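-- pv_equiv track=rewrite | github.com/dsenstad/Physics_Programs | Modern_Physics_Programs/Ionization_GPT.py | subshell_fill_order
-- ===== SOURCE A (Python) =====
-- def subshell_fill_order(nmax=10):
--     """
--     Generate subshells in (n+l, n) order (Aufbau / n+l rule).
--     Each subshell has capacity 2(2l+1).
--     Returns list of tuples (n, l, cap).
--     """
--     subs = []
--     for n in range(1, nmax + 1):
--         for l in range(0, n):
--             cap = 2 * (2 * l + 1)
--             subs.append((n, l, cap))
--     subs.sort(key=lambda t: (t[0] + t[1], t[0]))  # (n+l), then lower n first
--     return subs
-- ===== SOURCE B (Python) =====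
-- def subshell_fill_order(nmax=10):
--     """Emit subshells already in (n+l, n) order: no intermediate list, no sort."""
--     subs = []
--     for s in range(1, 2 * nmax):          # s = n + l
--         for n in range(s // 2 + 1, min(s, nmax) + 1):
--             l = s - n
--             subs.append((n, l, 2 * (2 * l + 1)))
--     return subs
-- ===== Notes on version B (the rewrite author's own statement) =====
-- stated objective: faster
-- what changed: B generates subshells directly in (n+l, n) order by looping over the shell sum s and deriving the n-range from the subshell bounds, so it builds no intermediate unsorted list and performs no sort.
import Mathlib
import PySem

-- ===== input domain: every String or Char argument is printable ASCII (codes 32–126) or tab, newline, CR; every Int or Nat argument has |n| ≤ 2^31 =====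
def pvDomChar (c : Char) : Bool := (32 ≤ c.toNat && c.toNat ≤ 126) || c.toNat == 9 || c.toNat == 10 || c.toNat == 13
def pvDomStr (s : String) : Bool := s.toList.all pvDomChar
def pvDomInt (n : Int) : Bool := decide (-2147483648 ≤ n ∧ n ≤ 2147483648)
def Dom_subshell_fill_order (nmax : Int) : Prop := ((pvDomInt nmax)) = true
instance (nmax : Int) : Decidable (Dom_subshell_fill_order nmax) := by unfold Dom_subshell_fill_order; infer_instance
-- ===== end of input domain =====

-- B emits the subshells already in (n+l, n) order by looping over the shell sum s,
-- so it builds no intermediate unsorted list and performs no sort.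

-- ===== PORT A =====
def subshell_fill_order (nmax : Int) : List (Int × Int × Int) :=
  let subs : List (Int × Int × Int) :=
    (PySem.List.pyRange 1 (nmax + 1)).foldl (fun subs n =>
      (PySem.List.pyRange 0 n).foldl (fun subs l =>
        let cap := 2 * (2 * l + 1)
        subs ++ [(n, l, cap)]) subs) []
  PySem.List.sorted2 subs (fun t => t.1 + t.2.1) (fun t => t.1)

-- ===== PORT B =====
def subshell_fill_order_alt (nmax : Int) : List (Int × Int × Int) :=
  (PySem.List.pyRange 1 (2 * nmax)).foldl (fun subs s =>
    (PySem.List.pyRange (PySem.Int.floordiv s 2 + 1) (min s nmax + 1)).foldl (fun subs n =>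
      let l := s - n
      subs ++ [(n, l, 2 * (2 * l + 1))]) subs) []

-- ===== PRECONDITION & SPEC =====
def Spec_subshell_fill_order (nmax : Int) (out : List (Int × Int × Int)) : Prop := out = subshell_fill_order_alt nmax
instance (nmax : Int) (out : List (Int × Int × Int)) : Decidable (Spec_subshell_fill_order nmax out) := by unfold Spec_subshell_fill_order; infer_instance

-- ===== CLAIM (what is proved, stated in full; the proofs are below) =====
def Claim_equal_subshell_fill_order : Prop := ∀ (nmax : Int), Dom_subshell_fill_order nmax → Spec_subshell_fill_order nmax (subshell_fill_order nmax)

-- ===== LEMMAS AND PROOFS =====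

-- A's unsorted list, in flatMap form
def rawA (nmax : Int) : List (Int × Int × Int) :=
  (PySem.List.pyRange 1 (nmax + 1)).flatMap (fun n =>
    (PySem.List.pyRange 0 n).map (fun l => (n, l, 2 * (2 * l + 1))))

-- B's list, in flatMap form
def rawB (nmax : Int) : List (Int × Int × Int) :=
  (PySem.List.pyRange 1 (2 * nmax)).flatMap (fun s =>
    (PySem.List.pyRange (s / 2 + 1) (min s nmax + 1)).map (fun n => (n, s - n, 2 * (2 * (s - n) + 1))))

lemma portA_eq (nmax : Int) :
    subshell_fill_order nmax
      = PySem.List.sorted2 (rawA nmax) (fun t => t.1 + t.2.1) (fun t => t.1) := by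
  unfold subshell_fill_order rawA
  simp only [PySem.List.foldl_append_singleton_eq_map]
  rw [PySem.List.foldl_append_eq_flatMap]
  simp

lemma portB_eq (nmax : Int) : subshell_fill_order_alt nmax = rawB nmax := by
  unfold subshell_fill_order_alt rawB
  have h2 : (0:Int) < 2 := by norm_num
  simp only [PySem.Int.floordiv_eq_ediv_of_pos h2,
    PySem.List.foldl_append_singleton_eq_map]
  rw [PySem.List.foldl_append_eq_flatMap]
  simp

-- sorted2 with two Int keys is sorted with the lexicographic key
lemma sorted2_eq_sorted_lex {α : Type} (xs : List α) (k1 k2 : α → Int) :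
    PySem.List.sorted2 xs k1 k2
      = PySem.List.sorted xs (fun a => (toLex (k1 a, k2 a) : Int ×ₗ Int)) := by
  rw [PySem.List.sorted_eq_foldl_insertBy]
  show List.foldl (fun acc x => PySem.List.insertBy
      (fun a b => decide (k1 a < k1 b) || (!decide (k1 b < k1 a) && decide (k2 a < k2 b))) x acc) [] xs
    = List.foldl (fun acc x => PySem.List.insertBy
      (fun a b => decide ((toLex (k1 a, k2 a) : Int ×ₗ Int) < toLex (k1 b, k2 b))) x acc) [] xs
  congr 1
  funext acc x
  congr 1
  funext a b
  rw [Bool.eq_iff_iff]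
  simp only [Bool.or_eq_true, Bool.and_eq_true, Bool.not_eq_eq_eq_not, Bool.not_true,
    decide_eq_true_eq, decide_eq_false_iff_not, Prod.Lex.toLex_lt_toLex]
  omega

-- rawB is strictly increasing in the lexicographic key (n+l, n)
lemma rawB_pairwise (nmax : Int) :
    (rawB nmax).Pairwise (fun a b =>
      (toLex (a.1 + a.2.1, a.1) : Int ×ₗ Int) < toLex (b.1 + b.2.1, b.1)) := by
  unfold rawB
  rw [List.pairwise_flatMap]
  constructor
  · intro s _
    rw [List.pairwise_map]
    exact (PySem.List.pairwise_lt_pyRange_one _ _).imp (by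
      intro n n' h
      show (toLex (n + (s - n), n) : Int ×ₗ Int) < toLex (n' + (s - n'), n')
      exact Prod.Lex.toLex_lt_toLex.mpr (Or.inr ⟨by omega, h⟩))
  · exact (PySem.List.pairwise_lt_pyRange_one _ _).imp (by
      intro s s' hss x hx y hy
      simp only [List.mem_map] at hx hy
      obtain ⟨n, -, rfl⟩ := hx
      obtain ⟨n', -, rfl⟩ := hy
      show (toLex (n + (s - n), n) : Int ×ₗ Int) < toLex (n' + (s' - n'), n')
      exact Prod.Lex.toLex_lt_toLex.mpr (Or.inl (by omega)))

-- rawA is strictly increasing in the lexicographic key (n, l)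
lemma rawA_pairwise (nmax : Int) :
    (rawA nmax).Pairwise (fun a b =>
      (toLex (a.1, a.2.1) : Int ×ₗ Int) < toLex (b.1, b.2.1)) := by
  unfold rawA
  rw [List.pairwise_flatMap]
  constructor
  · intro n _
    rw [List.pairwise_map]
    exact (PySem.List.pairwise_lt_pyRange_one _ _).imp (by
      intro l l' h
      show (toLex (n, l) : Int ×ₗ Int) < toLex (n, l')
      exact Prod.Lex.toLex_lt_toLex.mpr (Or.inr ⟨rfl, h⟩))
  · exact (PySem.List.pairwise_lt_pyRange_one _ _).imp (by
      intro n n' hnn x hx y hy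
      simp only [List.mem_map] at hx hy
      obtain ⟨l, -, rfl⟩ := hx
      obtain ⟨l', -, rfl⟩ := hy
      show (toLex (n, l) : Int ×ₗ Int) < toLex (n', l')
      exact Prod.Lex.toLex_lt_toLex.mpr (Or.inl hnn))

lemma pairwise_lt_nodup {α κ : Type} [LinearOrder κ] {xs : List α} {key : α → κ}
    (h : xs.Pairwise (fun a b => key a < key b)) : xs.Nodup :=
  h.imp (by rintro a b hab rfl; exact lt_irrefl _ hab)

lemma mem_rawA_iff (nmax : Int) (a : Int × Int × Int) :
    a ∈ rawA nmax ↔ ∃ n l : Int, 1 ≤ n ∧ n ≤ nmax ∧ 0 ≤ l ∧ l < n ∧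
      a = (n, l, 2 * (2 * l + 1)) := by
  unfold rawA
  simp only [List.mem_flatMap, List.mem_map, PySem.List.mem_pyRange_one]
  constructor
  · rintro ⟨n, ⟨h1, h2⟩, l, ⟨h3, h4⟩, rfl⟩
    exact ⟨n, l, h1, by omega, h3, h4, rfl⟩
  · rintro ⟨n, l, h1, h2, h3, h4, rfl⟩
    exact ⟨n, ⟨h1, by omega⟩, l, ⟨h3, h4⟩, rfl⟩

lemma mem_rawB_iff (nmax : Int) (a : Int × Int × Int) :
    a ∈ rawB nmax ↔ ∃ n l : Int, 1 ≤ n ∧ n ≤ nmax ∧ 0 ≤ l ∧ l < n ∧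
      a = (n, l, 2 * (2 * l + 1)) := by
  unfold rawB
  simp only [List.mem_flatMap, List.mem_map, PySem.List.mem_pyRange_one]
  constructor
  · rintro ⟨s, ⟨h1, h2⟩, n, ⟨h3, h4⟩, rfl⟩
    refine ⟨n, s - n, by omega, by omega, by omega, by omega, rfl⟩
  · rintro ⟨n, l, h1, h2, h3, h4, rfl⟩
    refine ⟨n + l, ⟨by omega, by omega⟩, n, ⟨by omega, by omega⟩, ?_⟩
    have hl : n + l - n = l := by omega
    rw [hl]

lemma rawB_perm_rawA (nmax : Int) : (rawB nmax).Perm (rawA nmax) := by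
  rw [List.perm_ext_iff_of_nodup
    (pairwise_lt_nodup (rawB_pairwise nmax)) (pairwise_lt_nodup (rawA_pairwise nmax))]
  intro a
  rw [mem_rawA_iff, mem_rawB_iff]

-- ===== VERDICT (by name: the statement is the Claim_ definition above) =====
theorem subshell_fill_order_spec : Claim_equal_subshell_fill_order := by
  intro nmax _
  show subshell_fill_order nmax = subshell_fill_order_alt nmax
  rw [portA_eq, portB_eq, sorted2_eq_sorted_lex]
  exact PySem.List.sorted_eq_of_perm_of_pairwise_lt _ _ _
    (rawB_perm_rawA nmax) (rawB_pairwise nmax)
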